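-- pv_equiv track=rewrite | github.com/RuedaM/RuedaM_CSCI-1100_F2021 | Homework/Homework03/hw3_part3.py | computing_tourists
-- ===== SOURCE A (Python) =====
-- def computing_tourists(bears):
--     touristCount = 0
--     if (bears >= 4) and (bears <= 15):
--         for bearCount in range(bears):
--             if (bearCount <= 9):
--                 touristCount += 10000
--             else:
--                 touristCount += 20000
--     return touristCount
-- ===== SOURCE B (Python) =====
-- def computing_tourists(bears):
--     if 4 <= bears <= 15:
--         return min(bears, 10) * 10000 + max(0, bears - 10) * 20000
--     return 0
-- ===== Notes on version B (the rewrite author's own statement) =====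
-- stated objective: simpler
-- what changed: Replaced the per-bear accumulation loop with a closed-form expression: a flat rate for the first up-to-ten bears plus the higher rate for each bear beyond ten.
import Mathlib
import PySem

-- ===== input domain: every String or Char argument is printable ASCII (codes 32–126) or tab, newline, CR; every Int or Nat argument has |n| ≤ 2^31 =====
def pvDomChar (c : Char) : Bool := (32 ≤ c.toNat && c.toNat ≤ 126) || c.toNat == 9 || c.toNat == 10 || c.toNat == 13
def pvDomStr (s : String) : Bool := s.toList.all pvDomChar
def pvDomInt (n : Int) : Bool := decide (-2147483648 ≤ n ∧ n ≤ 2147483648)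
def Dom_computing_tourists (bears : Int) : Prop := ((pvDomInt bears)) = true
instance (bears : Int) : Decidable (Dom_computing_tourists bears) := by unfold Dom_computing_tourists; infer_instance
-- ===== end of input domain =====

-- ===== PORT A =====
-- B replaces A's per-bear loop with a closed-form sum (objective: simpler).
def computing_tourists (bears : Int) : Int :=
  let touristCount : Int := 0
  if bears ≥ 4 ∧ bears ≤ 15 then
    (PySem.List.pyRange 0 bears 1).foldl
      (fun touristCount bearCount =>
        if bearCount ≤ 9 then touristCount + 10000 else touristCount + 20000)
      touristCount
  else touristCount

-- ===== PORT B =====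
def computing_tourists_alt (bears : Int) : Int :=
  if 4 ≤ bears ∧ bears ≤ 15 then
    min bears 10 * 10000 + max 0 (bears - 10) * 20000
  else 0

-- ===== PRECONDITION & SPEC =====
def Spec_computing_tourists (bears : Int) (out : Int) : Prop := out = computing_tourists_alt bears
instance (bears : Int) (out : Int) : Decidable (Spec_computing_tourists bears out) := by unfold Spec_computing_tourists; infer_instance

-- ===== CLAIM (what is proved, stated in full; the proofs are below) =====
def Claim_equal_computing_tourists : Prop := ∀ (bears : Int), Dom_computing_tourists bears → Spec_computing_tourists bears (computing_tourists bears)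

-- ===== LEMMAS AND PROOFS =====

-- ===== VERDICT (by name: the statement is the Claim_ definition above) =====
theorem computing_tourists_spec : Claim_equal_computing_tourists := by
  intro bears _
  unfold Spec_computing_tourists computing_tourists computing_tourists_alt
  by_cases h : bears ≥ 4 ∧ bears ≤ 15
  · obtain ⟨h1, h2⟩ := h
    interval_cases bears <;> decide
  · simp only [if_neg h]
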